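-- pv_equiv track=rewrite | github.com/skofield05/crazy-geese-website | scripts/scraper.py | find_existing_game
-- ===== SOURCE A (Python) =====
-- def find_existing_game(existing_games, new_game):
--     """
--     Sucht ein bestehendes Spiel, das zu new_game gehoert. Gibt das Dict
--     zurueck (mutierbar – Caller updated direkt) oder None.
--
--     Match-Reihenfolge:
--       1. spielnr (eindeutig pro Liga, bleibt auch bei Verlegung gleich)
--       2. (heim, gast). Bei mehreren Kandidaten: gleiches Datum bevorzugt.
--          Wenn nicht aufloesbar, kein Match (→ neues Spiel).
--
--     Hintergrund: ABF kann Termine/Orte aendern, ohne dass das Spiel "neu" ist.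
--     Match per spielnr toleriert solche Aenderungen; Fallback per (heim, gast)
--     deckt Bestandsspiele ab, die noch keine spielnr im JSON haben.
--     """
--     new_spielnr = new_game.get("spielnr")
--     if new_spielnr:
--         for g in existing_games:
--             if g.get("spielnr") == new_spielnr:
--                 return g
--
--     candidates = [
--         g for g in existing_games
--         if g.get("heim") == new_game.get("heim")
--         and g.get("gast") == new_game.get("gast")
--     ]
--     if len(candidates) == 1:
--         return candidates[0]
--     if len(candidates) > 1:
--         new_datum = new_game.get("datum")
--         if new_datum:
--             for c in candidates:
--                 if c.get("datum") == new_datum: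
--                     return c
--     return None
-- ===== SOURCE B (Python) =====
-- def find_existing_game(existing_games, new_game):
--     """Index-based lookup: one pass builds hash indexes keyed by spielnr,
--     by (heim, gast) and by (heim, gast, datum); the answer is then pure
--     dictionary lookups -- no list scans at resolution time."""
--     first_by_nr = {}
--     first_by_teams = {}
--     count_by_teams = {}
--     first_by_teams_datum = {}
--     for g in existing_games:
--         nr = g.get("spielnr")
--         if nr not in first_by_nr:
--             first_by_nr[nr] = g
--         key = (g.get("heim"), g.get("gast"))
--         if key not in first_by_teams:
--             first_by_teams[key] = g
--         count_by_teams[key] = count_by_teams.get(key, 0) + 1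
--         dkey = (g.get("heim"), g.get("gast"), g.get("datum"))
--         if dkey not in first_by_teams_datum:
--             first_by_teams_datum[dkey] = g
--
--     nr = new_game.get("spielnr")
--     if nr and nr in first_by_nr:
--         return first_by_nr[nr]
--     key = (new_game.get("heim"), new_game.get("gast"))
--     n = count_by_teams.get(key, 0)
--     if n == 1:
--         return first_by_teams[key]
--     if n > 1:
--         d = new_game.get("datum")
--         if d:
--             return first_by_teams_datum.get((key[0], key[1], d))
--     return None
-- ===== Notes on version B (the rewrite author's own statement) =====
-- stated objective: alternative
-- what changed: Replaces A's staged list scans (spielnr loop, (heim,gast) filter comprehension, datum scan over candidates) with hash indexes built in one pass -- first game per spielnr, first game and count per (heim,gast), first game per (heim,gast,datum) -- so the match is resolved by pure dictionary lookups with no list scan; correct because each index records exactly the first list element with that key, which is what A's first-match scans return.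
import Mathlib
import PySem

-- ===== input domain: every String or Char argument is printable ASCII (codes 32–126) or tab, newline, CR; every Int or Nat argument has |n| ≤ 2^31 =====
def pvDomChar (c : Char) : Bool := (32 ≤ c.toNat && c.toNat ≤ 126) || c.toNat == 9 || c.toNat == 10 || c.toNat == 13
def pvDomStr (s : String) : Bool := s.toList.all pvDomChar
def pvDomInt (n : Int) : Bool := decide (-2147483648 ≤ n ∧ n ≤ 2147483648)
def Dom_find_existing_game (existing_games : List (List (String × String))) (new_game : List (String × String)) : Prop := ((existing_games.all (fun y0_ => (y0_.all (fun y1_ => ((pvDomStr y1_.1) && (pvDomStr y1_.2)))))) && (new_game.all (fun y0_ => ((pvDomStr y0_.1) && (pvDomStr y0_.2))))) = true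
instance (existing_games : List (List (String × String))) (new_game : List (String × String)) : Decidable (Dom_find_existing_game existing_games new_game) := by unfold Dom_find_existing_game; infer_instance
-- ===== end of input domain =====

-- B replaces A's staged list scans with hash indexes (first-per-spielnr,
-- first-and-count-per-(heim,gast), first-per-(heim,gast,datum)) built in one
-- pass, resolving the match by pure dictionary lookups; objective: alternative.


-- Python truthiness of an optional string: None and "" are falsy.
def pvTruthy (o : Option String) : Bool :=
  match o with
  | none => false
  | some s => !(s == "")

-- ===== PORT A =====
def find_existing_game (existing_games : List (List (String × String))) (new_game : List (String × String)) : Option (List (String × String)) :=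
  let new_spielnr := new_game.lookup "spielnr"
  let nrMatch : Option (List (String × String)) :=
    if pvTruthy new_spielnr then
      existing_games.find? (fun g => g.lookup "spielnr" == new_spielnr)
    else none
  match nrMatch with
  | some g => some g
  | none =>
      let candidates := existing_games.filter (fun g =>
        g.lookup "heim" == new_game.lookup "heim" &&
        g.lookup "gast" == new_game.lookup "gast")
      if candidates.length == 1 then candidates[0]?
      else if candidates.length > 1 then
        let new_datum := new_game.lookup "datum"
        if pvTruthy new_datum then
          candidates.find? (fun c => c.lookup "datum" == new_datum)
        else none
      else none

-- ===== PORT B =====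
-- the index-building loop of Source B: four dicts built in one traversal
def altIndex :
    List (List (String × String)) →
    PySem.Dict (Option String) (List (String × String)) →
    PySem.Dict (Option String × Option String) (List (String × String)) →
    PySem.Dict (Option String × Option String) Int →
    PySem.Dict (Option String × Option String × Option String) (List (String × String)) →
    PySem.Dict (Option String) (List (String × String)) ×
    PySem.Dict (Option String × Option String) (List (String × String)) ×
    PySem.Dict (Option String × Option String) Int ×
    PySem.Dict (Option String × Option String × Option String) (List (String × String))
  | [], byNr, ft, cnt, ftd => (byNr, ft, cnt, ftd)
  | g :: rest, byNr, ft, cnt, ftd =>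
      let nr := g.lookup "spielnr"
      let byNr' := if byNr.contains nr then byNr else byNr.insert nr g
      let key := (g.lookup "heim", g.lookup "gast")
      let ft' := if ft.contains key then ft else ft.insert key g
      let cnt' := cnt.insert key (cnt.getD key 0 + 1)
      let dkey := (g.lookup "heim", g.lookup "gast", g.lookup "datum")
      let ftd' := if ftd.contains dkey then ftd else ftd.insert dkey g
      altIndex rest byNr' ft' cnt' ftd'

def find_existing_game_alt (existing_games : List (List (String × String))) (new_game : List (String × String)) : Option (List (String × String)) :=
  let idx := altIndex existing_games PySem.Dict.empty PySem.Dict.empty PySem.Dict.empty PySem.Dict.empty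
  let nr := new_game.lookup "spielnr"
  if pvTruthy nr && idx.1.contains nr then idx.1.get? nr
  else
    let key := (new_game.lookup "heim", new_game.lookup "gast")
    let n := idx.2.2.1.getD key 0
    if n == 1 then idx.2.1.get? key
    else if n > 1 then
      let d := new_game.lookup "datum"
      if pvTruthy d then idx.2.2.2.get? (key.1, key.2, d) else none
    else none

-- ===== PRECONDITION & SPEC =====
def Spec_find_existing_game (existing_games : List (List (String × String))) (new_game : List (String × String)) (out : Option (List (String × String))) : Prop := out = find_existing_game_alt existing_games new_game
instance (existing_games : List (List (String × String))) (new_game : List (String × String)) (out : Option (List (String × String))) : Decidable (Spec_find_existing_game existing_games new_game out) := by unfold Spec_find_existing_game; infer_instance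

-- ===== CLAIM (what is proved, stated in full; the proofs are below) =====
def Claim_equal_find_existing_game : Prop := ∀ (existing_games : List (List (String × String))) (new_game : List (String × String)), Dom_find_existing_game existing_games new_game → Spec_find_existing_game existing_games new_game (find_existing_game existing_games new_game)

-- ===== LEMMAS AND PROOFS =====

-- generic "first element per key" fold (proof-side view of altIndex's components)
def firstIndex {κ α : Type} [BEq κ] (keyf : α → κ) : List α → PySem.Dict κ α → PySem.Dict κ α
  | [], d => d
  | g :: rest, d => firstIndex keyf rest (if d.contains (keyf g) then d else d.insert (keyf g) g)

-- generic count-per-key fold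
def cntIndex {κ α : Type} [BEq κ] (keyf : α → κ) : List α → PySem.Dict κ Int → PySem.Dict κ Int
  | [], d => d
  | g :: rest, d => cntIndex keyf rest (d.insert (keyf g) (d.getD (keyf g) 0 + 1))

lemma firstIndex_get? {κ α : Type} [BEq κ] [LawfulBEq κ] [DecidableEq κ] (keyf : α → κ)
    (l : List α) (d : PySem.Dict κ α) (k : κ) :
    (firstIndex keyf l d).get? k = (d.get? k).or (l.find? (fun g => keyf g == k)) := by
  induction l generalizing d with
  | nil => simp [firstIndex]
  | cons g rest ih =>
      simp only [firstIndex, ih, List.find?]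
      by_cases hc : d.contains (keyf g) = true
      · simp only [hc, if_true]
        by_cases hk : keyf g == k
        · have hk' : keyf g = k := by simpa using hk
          subst hk'
          have hs : (d.get? (keyf g)).isSome := by
            rw [← PySem.Dict.contains_eq_isSome_get?]; exact hc
          cases h : d.get? (keyf g) with
          | none => rw [h] at hs; simp at hs
          | some v => simp [Option.or]
        · simp [hk]
      · simp only [Bool.not_eq_true] at hc
        simp only [hc, Bool.false_eq_true, if_false]
        rw [PySem.Dict.get?_insert]
        have hnone : d.get? (keyf g) = none := by
          have h2 := PySem.Dict.contains_eq_isSome_get? (d := d) (k := keyf g)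
          rw [hc] at h2
          cases h : d.get? (keyf g) with
          | none => rfl
          | some v => rw [h] at h2; simp at h2
        by_cases hk : keyf g == k
        · have hk' : keyf g = k := by simpa using hk
          subst hk'
          simp [hnone, Option.or]
        · have hk' : k ≠ keyf g := fun h => by subst h; simp at hk
          simp [hk', hk]

lemma cntIndex_getD {κ α : Type} [BEq κ] [LawfulBEq κ] [DecidableEq κ] (keyf : α → κ)
    (l : List α) (d : PySem.Dict κ Int) (k : κ) :
    (cntIndex keyf l d).getD k 0 = d.getD k 0 + (l.countP (fun g => keyf g == k) : Int) := by
  induction l generalizing d with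
  | nil => simp [cntIndex]
  | cons g rest ih =>
      simp only [cntIndex, ih, List.countP_cons]
      rw [PySem.Dict.getD_insert]
      by_cases hk : keyf g == k
      · have hk' : keyf g = k := by simpa using hk
        subst hk'
        simp
        ring
      · have hk' : k ≠ keyf g := fun h => by subst h; simp at hk
        simp [hk', hk]

-- the four components of altIndex are the generic folds
lemma altIndex_eq (l : List (List (String × String)))
    (byNr : PySem.Dict (Option String) (List (String × String)))
    (ft : PySem.Dict (Option String × Option String) (List (String × String)))
    (cnt : PySem.Dict (Option String × Option String) Int)
    (ftd : PySem.Dict (Option String × Option String × Option String) (List (String × String))) :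
    altIndex l byNr ft cnt ftd =
      (firstIndex (fun g => g.lookup "spielnr") l byNr,
       firstIndex (fun g => (g.lookup "heim", g.lookup "gast")) l ft,
       cntIndex (fun g => (g.lookup "heim", g.lookup "gast")) l cnt,
       firstIndex (fun g => (g.lookup "heim", g.lookup "gast", g.lookup "datum")) l ftd) := by
  induction l generalizing byNr ft cnt ftd with
  | nil => simp [altIndex, firstIndex, cntIndex]
  | cons g rest ih => simp only [altIndex, firstIndex, cntIndex, ih]

-- ===== VERDICT (by name: the statement is the Claim_ definition above) =====
theorem find_existing_game_spec : Claim_equal_find_existing_game := by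
  intro eg ng _
  unfold Spec_find_existing_game find_existing_game find_existing_game_alt
  rw [altIndex_eq]
  simp only [PySem.Dict.contains_eq_isSome_get?, firstIndex_get?, cntIndex_getD,
    PySem.Dict.get?_empty, PySem.Dict.getD_empty, Option.none_or, zero_add]
  -- the (heim, gast) pair / triple predicates of B are A's conjunctions
  have hpB : (fun g : List (String × String) =>
      ((g.lookup "heim", g.lookup "gast") == (ng.lookup "heim", ng.lookup "gast"))) =
      (fun g : List (String × String) =>
      g.lookup "heim" == ng.lookup "heim" && g.lookup "gast" == ng.lookup "gast") := rfl
  rw [hpB]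
  have hcnt : (eg.countP (fun g : List (String × String) =>
      g.lookup "heim" == ng.lookup "heim" && g.lookup "gast" == ng.lookup "gast")) =
      (eg.filter (fun g : List (String × String) =>
      g.lookup "heim" == ng.lookup "heim" && g.lookup "gast" == ng.lookup "gast")).length :=
    List.countP_eq_length_filter
  rw [hcnt]
  have hhead : eg.find? (fun g : List (String × String) =>
      g.lookup "heim" == ng.lookup "heim" && g.lookup "gast" == ng.lookup "gast") =
      (eg.filter (fun g : List (String × String) =>
      g.lookup "heim" == ng.lookup "heim" && g.lookup "gast" == ng.lookup "gast"))[0]? := by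
    rw [← List.head?_eq_getElem?, List.head?_filter]
  have hpT : (fun g : List (String × String) =>
      ((g.lookup "heim", g.lookup "gast", g.lookup "datum") ==
        (ng.lookup "heim", ng.lookup "gast", ng.lookup "datum"))) =
      (fun g : List (String × String) =>
      g.lookup "heim" == ng.lookup "heim" &&
        (g.lookup "gast" == ng.lookup "gast" && g.lookup "datum" == ng.lookup "datum")) := rfl
  rw [hpT]
  have hdat : (eg.filter (fun g : List (String × String) =>
      g.lookup "heim" == ng.lookup "heim" && g.lookup "gast" == ng.lookup "gast")).find?
        (fun c => c.lookup "datum" == ng.lookup "datum") =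
      eg.find? (fun g : List (String × String) =>
      g.lookup "heim" == ng.lookup "heim" &&
        (g.lookup "gast" == ng.lookup "gast" && g.lookup "datum" == ng.lookup "datum")) := by
    rw [List.find?_filter]
    congr 1
    funext g
    by_cases h1 : g.lookup "heim" = ng.lookup "heim" <;>
      by_cases h2 : g.lookup "gast" = ng.lookup "gast" <;>
        by_cases h3 : g.lookup "datum" = ng.lookup "datum" <;>
          simp [h1, h2, h3]
  set c := (eg.filter (fun g : List (String × String) =>
      g.lookup "heim" == ng.lookup "heim" && g.lookup "gast" == ng.lookup "gast")).length with hc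
  by_cases ht : pvTruthy (ng.lookup "spielnr") = true
  · cases hfind : eg.find? (fun g : List (String × String) =>
        g.lookup "spielnr" == ng.lookup "spielnr") with
    | some g => simp [ht]
    | none =>
        simp only [ht, if_true, Option.isSome_none, Bool.and_false, Bool.false_eq_true, if_false]
        by_cases hc1 : c = 1
        · simp [hc1, hhead]
        · have hc1' : ¬ ((c : Int) = 1) := by exact_mod_cast hc1
          by_cases hc2 : 1 < c
          · have hc2' : (1 : Int) < (c : Int) := by exact_mod_cast hc2
            simp [hc1, hc1', hc2, hc2', hdat]
          · have hc2' : ¬ ((1 : Int) < (c : Int)) := by exact_mod_cast hc2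
            simp [hc1, hc1', hc2, hc2']
  · have ht' : pvTruthy (ng.lookup "spielnr") = false := by
      revert ht; cases pvTruthy (ng.lookup "spielnr") <;> simp
    simp only [ht', Bool.false_eq_true, if_false, Bool.false_and]
    by_cases hc1 : c = 1
    · simp [hc1, hhead]
    · have hc1' : ¬ ((c : Int) = 1) := by exact_mod_cast hc1
      by_cases hc2 : 1 < c
      · have hc2' : (1 : Int) < (c : Int) := by exact_mod_cast hc2
        simp [hc1, hc1', hc2, hc2', hdat]
      · have hc2' : ¬ ((1 : Int) < (c : Int)) := by exact_mod_cast hc2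
        simp [hc1, hc1', hc2, hc2']
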